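-- pv_equiv track=rewrite | github.com/Yuchao-ho/Paricle_track_MAGIK | Pipeline/Find_traj.py | recurr
-- ===== SOURCE A (Python) =====
-- def recurr(adj_dict, start_node, id_mask):
--     stack = [start_node]
--     path = []
--
--     while stack:
--         node = stack.pop()
--         if not id_mask[node]:
--             path.append(node)
--             id_mask[node] = True
--             # Add neighbors in reverse order to maintain path sequence
--             stack.extend(adj_dict[node][::-1])
--
--     return path
-- ===== SOURCE B (Python) =====
-- def recurr(adj_dict, start_node, id_mask):
--     # Explicit-frame DFS: a stack of (node, next-child-index) frames, marking a
--     # node when it is first discovered, instead of a node stack with reversed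
--     # pushes and check-on-pop.  Same preorder, same in-place marks on id_mask.
--     path = []
--     if not id_mask[start_node]:
--         path.append(start_node)
--         id_mask[start_node] = True
--         frames = [(start_node, 0)]
--         while frames:
--             node, i = frames[-1]
--             nbrs = adj_dict[node]
--             if i == len(nbrs):
--                 frames.pop()
--                 continue
--             frames[-1] = (node, i + 1)
--             nb = nbrs[i]
--             if not id_mask[nb]:
--                 path.append(nb)
--                 id_mask[nb] = True
--                 frames.append((nb, 0))
--     return path
-- ===== Notes on version B (the rewrite author's own statement) =====
-- stated objective: alternative
-- what changed: Replaces the node stack with reversed pushes and check-on-pop by an explicit-frame DFS: a stack of (node, next-child-index) frames, marking each node when first discovered and scanning neighbor lists forward in place, so nodes are never pushed more than once and neighbor lists are never copied or reversed.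
-- outside the precondition, e.g. on recurr({-1: [0], 0: [7]}, -1, [False]): A returns [-1], B returns [-1]
import Mathlib
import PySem

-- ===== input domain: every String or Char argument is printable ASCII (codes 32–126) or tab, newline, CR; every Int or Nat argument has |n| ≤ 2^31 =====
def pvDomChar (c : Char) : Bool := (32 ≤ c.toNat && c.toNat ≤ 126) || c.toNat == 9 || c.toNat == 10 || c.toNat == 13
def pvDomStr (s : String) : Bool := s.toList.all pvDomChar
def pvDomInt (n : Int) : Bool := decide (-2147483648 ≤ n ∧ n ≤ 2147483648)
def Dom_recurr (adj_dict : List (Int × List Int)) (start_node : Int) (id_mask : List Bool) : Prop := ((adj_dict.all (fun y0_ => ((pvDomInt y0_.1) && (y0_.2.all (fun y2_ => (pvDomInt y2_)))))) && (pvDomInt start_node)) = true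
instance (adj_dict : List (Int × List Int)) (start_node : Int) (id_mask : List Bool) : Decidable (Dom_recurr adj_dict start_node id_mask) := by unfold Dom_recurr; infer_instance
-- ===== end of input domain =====

-- B replaces A's node stack (reversed pushes, check-on-pop) by an explicit-frame DFS
-- (a stack of (node, next-child-index) frames, mark on first discovery, forward scan):
-- same preorder, same cost (objective: alternative).  Both Pythons mutate id_mask in
-- place identically; the equivalence proved here is about the RETURN value.

-- dict lookup adj_dict[node] (first match; none = KeyError), shared primitive of both ports
def pvLookup (adj : List (Int × List Int)) (n : Int) : Option (List Int) :=
  PySem.Dict.get? (PySem.Dict.mk adj) n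

-- termination helper (cited by both ports' decreasing_by): marking an unmarked cell
-- strictly decreases the number of False cells
theorem pvCountFalseSetLt : ∀ (xs : List Bool) (k : Nat), xs[k]? = some false →
    (xs.set k true).count false < xs.count false := by
  intro xs
  induction xs with
  | nil => intro k h; simp at h
  | cons x xs ih =>
    intro k h
    cases k with
    | zero =>
      simp_all
    | succ k =>
      simp only [List.getElem?_cons_succ] at h
      have := ih k h
      simp [List.count_cons]
      omega

theorem pvCountFalseLt {mask mask' : List Bool} {i : Int}
    (hg : PySem.List.pyGet? mask i = some false)
    (hs : PySem.List.pySet? mask i true = some mask') :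
    mask'.count false < mask.count false := by
  unfold PySem.List.pyGet? at hg
  unfold PySem.List.pySet? at hs
  cases hk : PySem.List.pyIdx? mask.length i with
  | none => rw [hk] at hg; simp at hg
  | some k =>
    rw [hk] at hg hs
    simp only [Option.bind_some, Option.map_some, Option.some.injEq] at hg hs
    subst hs
    exact pvCountFalseSetLt mask k hg

-- ===== PORT A =====
-- A's while loop; the Python stack is modeled top-first (head = top), so Python's
-- pop() becomes a head match and extend(adj_dict[node][::-1]) followed by pops
-- becomes pushing nbrs ++ rest.  none-results of the primitives are Python raises
-- (outside Pre_); there the loop stops with the path built so far.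
def recurrLoop (adj_dict : List (Int × List Int)) (stack : List Int)
    (path : List Int) (mask : List Bool) : List Int :=
  match stack with
  | [] => path
  | node :: rest =>
    match hg : PySem.List.pyGet? mask node with
    | none => path                                   -- IndexError
    | some true => recurrLoop adj_dict rest path mask
    | some false =>
      match hs : PySem.List.pySet? mask node true with
      | none => path                                 -- unreachable: pyGet? succeeded
      | some mask' =>
        match pvLookup adj_dict node with
        | none => path ++ [node]                     -- KeyError
        | some nbrs => recurrLoop adj_dict (nbrs ++ rest) (path ++ [node]) mask'
termination_by (mask.count false, stack.length)
decreasing_by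
  · exact Prod.Lex.right _ (by simp)
  · exact Prod.Lex.left _ _ (pvCountFalseLt hg hs)

def recurr (adj_dict : List (Int × List Int)) (start_node : Int) (id_mask : List Bool) : List Int :=
  recurrLoop adj_dict [start_node] [] id_mask

-- ===== PORT B =====
-- B's while loop over frames (node, next-child-index); frames top-first (head = top).
def recurrAltLoop (adj_dict : List (Int × List Int)) (frames : List (Int × Nat))
    (path : List Int) (mask : List Bool) : List Int :=
  match frames with
  | [] => path
  | (node, i) :: rest =>
    match hl : pvLookup adj_dict node with
    | none => path                                   -- KeyError
    | some nbrs =>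
      if hlt : i < nbrs.length then
        match hg : PySem.List.pyGet? mask nbrs[i] with
        | none => path                               -- IndexError
        | some true => recurrAltLoop adj_dict ((node, i + 1) :: rest) path mask
        | some false =>
          match hs : PySem.List.pySet? mask nbrs[i] true with
          | none => path ++ [nbrs[i]]                -- unreachable: pyGet? succeeded
          | some mask' =>
            recurrAltLoop adj_dict ((nbrs[i], 0) :: (node, i + 1) :: rest)
              (path ++ [nbrs[i]]) mask'
      else
        recurrAltLoop adj_dict rest path mask        -- frames.pop()
termination_by (mask.count false,
  (frames.map (fun f => ((pvLookup adj_dict f.1).getD []).length - f.2)).sum + frames.length)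
decreasing_by
  · apply Prod.Lex.right
    simp_all
    omega
  · exact Prod.Lex.left _ _ (pvCountFalseLt hg hs)
  · apply Prod.Lex.right
    simp_all

def recurr_alt (adj_dict : List (Int × List Int)) (start_node : Int) (id_mask : List Bool) : List Int :=
  match PySem.List.pyGet? id_mask start_node with
  | none => []                                       -- IndexError
  | some true => []
  | some false =>
    match PySem.List.pySet? id_mask start_node true with
    | none => [start_node]                           -- unreachable: pyGet? succeeded
    | some mask' => recurrAltLoop adj_dict [(start_node, 0)] [start_node] mask'

-- ===== PRECONDITION & SPEC =====
-- The domain of A is reachability-shaped: A raises (IndexError/KeyError) exactly when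
-- its search REACHES an invalid node.  Pre_ states that: every node reachable from
-- start_node through nodes whose ORIGINAL id_mask cell is False must be a valid
-- Python index of id_mask and, when its own cell is False, a key of adj_dict.
-- pvReach computes that reachable set as a least fixpoint (a standard graph closure,
-- not either port's traversal: it keeps no order, no path, no evolving mask).
-- It is conservative only when a negative and a nonnegative node index alias the same
-- id_mask cell (the run may mask a node mid-way): a few returning inputs with such
-- aliased pairs are excluded — see the cites in the claim.

-- nodes one unmasked step away from n (empty when n's cell is not False)
def pvNbrs (adj : List (Int × List Int)) (mask0 : List Bool) (n : Int) : List Int :=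
  if PySem.List.pyGet? mask0 n = some false then (pvLookup adj n).getD [] else []

-- every node that can ever be mentioned: start_node and all neighbor-list entries
def pvUniv (adj : List (Int × List Int)) (s : Int) : List Int :=
  s :: adj.flatMap (fun p => p.2)

def pvStep (adj : List (Int × List Int)) (mask0 : List Bool) (univ S : List Int) : List Int :=
  ((S ++ S.flatMap (pvNbrs adj mask0)).dedup).filter (fun n => univ.contains n)

-- closure iteration: k bounds how many times the set may still grow (it grows at
-- most univ.dedup.length times, so pvReach's bound below makes this a least fixpoint);
-- structural recursion on k keeps the definition kernel-reducible
def pvIterN (adj : List (Int × List Int)) (mask0 : List Bool) (univ : List Int) :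
    Nat → List Int → List Int
  | 0, S => S
  | k + 1, S =>
    if (pvStep adj mask0 univ S).length ≤ S.length then S
    else pvIterN adj mask0 univ k (pvStep adj mask0 univ S)

-- the set of nodes A's search can reach (w.r.t. the original mask)
def pvReach (adj : List (Int × List Int)) (mask0 : List Bool) (s : Int) : List Int :=
  pvIterN adj mask0 (pvUniv adj s) ((pvUniv adj s).dedup.length + 1) [s]

def Pre_recurr (adj_dict : List (Int × List Int)) (start_node : Int) (id_mask : List Bool) : Prop :=
  ∀ n ∈ pvReach adj_dict id_mask start_node,
    PySem.Raise.InRange id_mask.length n ∧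
    (PySem.List.pyGet? id_mask n = some false → n ∈ adj_dict.map Prod.fst)
instance (adj_dict : List (Int × List Int)) (start_node : Int) (id_mask : List Bool) : Decidable (Pre_recurr adj_dict start_node id_mask) := by unfold Pre_recurr; infer_instance

def pvWitness_recurr : (List (Int × List Int)) × Int × List Bool :=
  ([(0, [1, 2]), (1, [2]), (2, [0])], 0, [false, false, false])

def Spec_recurr (adj_dict : List (Int × List Int)) (start_node : Int) (id_mask : List Bool) (out : List Int) : Prop := out = recurr_alt adj_dict start_node id_mask
instance (adj_dict : List (Int × List Int)) (start_node : Int) (id_mask : List Bool) (out : List Int) : Decidable (Spec_recurr adj_dict start_node id_mask out) := by unfold Spec_recurr; infer_instance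

-- ===== CLAIM (what is proved, stated in full; the proofs are below) =====
def Claim_equal_recurr : Prop := ∀ (adj_dict : List (Int × List Int)) (start_node : Int) (id_mask : List Bool), Dom_recurr adj_dict start_node id_mask → Pre_recurr adj_dict start_node id_mask → Spec_recurr adj_dict start_node id_mask (recurr adj_dict start_node id_mask)

-- ===== LEMMAS AND PROOFS =====

-- A's pending stack corresponding to B's frame stack: the not-yet-scanned suffix of
-- every frame's neighbor list, in order
def pvFlat (adj_dict : List (Int × List Int)) (frames : List (Int × Nat)) : List Int :=
  frames.flatMap (fun f => ((pvLookup adj_dict f.1).getD []).drop f.2)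

-- mask is the original mask with some cells set to True
def pvMaskMono (mask0 mask : List Bool) : Prop :=
  mask.length = mask0.length ∧ ∀ k : Nat, mask0[k]? = some true → mask[k]? = some true

theorem pvLookup_isSome_of_mem {adj : List (Int × List Int)} {n : Int}
    (h : n ∈ adj.map Prod.fst) : (pvLookup adj n).isSome := by
  unfold pvLookup PySem.Dict.get?
  rw [Option.isSome_map]
  rw [List.find?_isSome]
  simp only [List.mem_map] at h
  obtain ⟨p, hp, hp1⟩ := h
  exact ⟨p, hp, by simp [hp1]⟩

theorem pvLookup_eq_some_mem {adj : List (Int × List Int)} {n : Int} {vs : List Int}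
    (h : pvLookup adj n = some vs) : ∃ p ∈ adj, p.2 = vs := by
  unfold pvLookup PySem.Dict.get? at h
  rw [Option.map_eq_some_iff] at h
  obtain ⟨p, hp, hp2⟩ := h
  exact ⟨p, List.mem_of_find?_eq_some hp, hp2⟩

theorem pvMaskMono_refl (mask : List Bool) : pvMaskMono mask mask := ⟨rfl, fun _ h => h⟩

theorem pvMaskMono_set {mask0 mask mask' : List Bool} {i : Int}
    (h : pvMaskMono mask0 mask) (hs : PySem.List.pySet? mask i true = some mask') :
    pvMaskMono mask0 mask' := by
  obtain ⟨hlen, hmono⟩ := h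
  unfold PySem.List.pySet? at hs
  cases hk : PySem.List.pyIdx? mask.length i with
  | none => rw [hk] at hs; simp at hs
  | some j =>
    rw [hk] at hs
    simp only [Option.map_some, Option.some.injEq] at hs
    subst hs
    refine ⟨by rw [List.length_set, hlen], fun k hk0 => ?_⟩
    rw [List.getElem?_set]
    by_cases hjk : j = k
    · subst hjk
      have hlt : j < mask0.length := (List.getElem?_eq_some_iff.mp hk0).1
      simp [hlen ▸ hlt]
    · simp only [if_neg hjk]
      exact hmono k hk0

-- a cell read as False in the current mask was False in the original mask
theorem pvFalse_orig {mask0 mask : List Bool} {n : Int}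
    (h : pvMaskMono mask0 mask) (hg : PySem.List.pyGet? mask n = some false) :
    PySem.List.pyGet? mask0 n = some false := by
  obtain ⟨hlen, hmono⟩ := h
  unfold PySem.List.pyGet? at hg ⊢
  rw [hlen] at hg
  cases hk : PySem.List.pyIdx? mask0.length n with
  | none => rw [hk] at hg; simp at hg
  | some k =>
    rw [hk] at hg
    simp only [Option.bind_some] at hg ⊢
    have hklt : k < mask.length := (List.getElem?_eq_some_iff.mp hg).1
    cases hb : mask0[k]? with
    | none =>
      rw [List.getElem?_eq_none_iff] at hb
      rw [hlen] at hklt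
      omega
    | some b =>
      cases b with
      | false => rfl
      | true => rw [hmono k hb] at hg; simp at hg

-- the closure grows: S ⊆ pvIter … S (for S ⊆ univ)
-- nodup subset bound used by the closure lemmas
theorem pvLenLeOfNodupSubset {T univ : List Int} (h1 : T.Nodup) (h2 : T ⊆ univ) :
    T.length ≤ univ.dedup.length := by
  rw [← List.toFinset_card_of_nodup h1, ← List.card_toFinset]
  exact Finset.card_le_card (fun x hx => List.mem_toFinset.mpr (h2 (List.mem_toFinset.mp hx)))

theorem pvStep_nodup (adj : List (Int × List Int)) (mask0 : List Bool) (univ S : List Int) :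
    (pvStep adj mask0 univ S).Nodup :=
  List.Nodup.filter _ (List.nodup_dedup _)

theorem pvStep_subset_univ (adj : List (Int × List Int)) (mask0 : List Bool) (univ S : List Int) :
    pvStep adj mask0 univ S ⊆ univ := by
  intro x hx
  exact List.contains_iff_mem.mp (List.mem_filter.mp hx).2

theorem pvIter_sub (adj : List (Int × List Int)) (mask0 : List Bool) (univ : List Int) :
    ∀ (k : Nat) (S : List Int), S ⊆ univ → S ⊆ pvIterN adj mask0 univ k S := by
  intro k
  induction k with
  | zero => intro S _; exact fun x h => h
  | succ k ih =>
    intro S hSu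
    rw [pvIterN]
    split
    · exact fun x h => h
    · have hST : S ⊆ pvStep adj mask0 univ S := by
        intro x hx
        exact List.mem_filter.mpr ⟨List.mem_dedup.mpr (List.mem_append_left _ hx),
          List.contains_iff_mem.mpr (hSu hx)⟩
      exact fun x hx => ih (pvStep adj mask0 univ S) (pvStep_subset_univ adj mask0 univ S) (hST hx)

-- the closure is closed under one unmasked step (for neighbors inside univ),
-- provided k is large enough that the iteration has reached its fixpoint
theorem pvIter_closed (adj : List (Int × List Int)) (mask0 : List Bool) (univ : List Int) :
    ∀ (k : Nat) (S : List Int), S.Nodup → S ⊆ univ → univ.dedup.length < S.length + k →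
      ∀ n ∈ pvIterN adj mask0 univ k S, ∀ v ∈ pvNbrs adj mask0 n, v ∈ univ →
        v ∈ pvIterN adj mask0 univ k S := by
  intro k
  induction k with
  | zero =>
    intro S hnd hSu hbound
    exact absurd (pvLenLeOfNodupSubset hnd hSu) (by omega)
  | succ k ih =>
    intro S hnd hSu hbound
    rw [pvIterN]
    split
    · next hstop =>
      intro n hn v hv hvu
      -- at the fixpoint, pvStep's result and S have the same elements
      have hST : S ⊆ pvStep adj mask0 univ S := by
        intro x hx
        exact List.mem_filter.mpr ⟨List.mem_dedup.mpr (List.mem_append_left _ hx),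
          List.contains_iff_mem.mpr (hSu hx)⟩
      have hTS : pvStep adj mask0 univ S ⊆ S := by
        have hTnd := pvStep_nodup adj mask0 univ S
        have hcard : S.toFinset = (pvStep adj mask0 univ S).toFinset := by
          apply Finset.eq_of_subset_of_card_le
          · exact fun x hx => List.mem_toFinset.mpr (hST (List.mem_toFinset.mp hx))
          · rw [List.toFinset_card_of_nodup hTnd, List.toFinset_card_of_nodup hnd]
            exact hstop
        intro x hx
        exact List.mem_toFinset.mp (hcard ▸ List.mem_toFinset.mpr hx)
      apply hTS
      exact List.mem_filter.mpr ⟨List.mem_dedup.mpr (List.mem_append_right _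
        (List.mem_flatMap.mpr ⟨n, hn, hv⟩)), List.contains_iff_mem.mpr hvu⟩
    · next hstop =>
      have hgrow : S.length < (pvStep adj mask0 univ S).length := by omega
      exact ih (pvStep adj mask0 univ S) (pvStep_nodup adj mask0 univ S)
        (pvStep_subset_univ adj mask0 univ S) (by omega)

-- main simulation lemma: B's frame loop equals A's node-stack loop on the flattened
-- pending stack, for any set R of good nodes closed under unmasked steps
theorem pvMain (adj : List (Int × List Int)) (mask0 : List Bool) (R : List Int)
    (hgood : ∀ n ∈ R, PySem.Raise.InRange mask0.length n ∧
      (PySem.List.pyGet? mask0 n = some false → n ∈ adj.map Prod.fst))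
    (hclosed : ∀ n ∈ R, PySem.List.pyGet? mask0 n = some false →
      ∀ vs, pvLookup adj n = some vs → ∀ v ∈ vs, v ∈ R) :
    ∀ (frames : List (Int × Nat)) (path : List Int) (mask : List Bool),
      pvMaskMono mask0 mask →
      (∀ f ∈ frames, f.1 ∈ R ∧ PySem.List.pyGet? mask0 f.1 = some false) →
      recurrAltLoop adj frames path mask = recurrLoop adj (pvFlat adj frames) path mask := by
  intro frames path mask
  fun_induction recurrAltLoop adj frames path mask with
  | case1 path mask => intro _ _; simp [pvFlat, recurrLoop]
  | case2 path mask node i rest hl =>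
    intro _ hf
    exfalso
    obtain ⟨hR, hF⟩ := hf (node, i) (by simp)
    have := pvLookup_isSome_of_mem ((hgood node hR).2 hF)
    rw [hl] at this; simp at this
  | case3 path mask node i rest nbrs hl hlt hg =>
    intro hDom hf
    exfalso
    obtain ⟨hR, hF⟩ := hf (node, i) (by simp)
    have hnbR : nbrs[i] ∈ R := hclosed node hR hF nbrs hl nbrs[i] (List.getElem_mem hlt)
    rw [PySem.List.pyGet?_eq_none_iff] at hg
    rw [hDom.1] at hg
    exact hg (hgood nbrs[i] hnbR).1
  | case4 path mask node i rest nbrs hl hlt hg ih =>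
    intro hDom hf
    have step : pvFlat adj ((node, i) :: rest) =
        nbrs[i] :: (nbrs.drop (i + 1) ++ pvFlat adj rest) := by
      simp only [pvFlat, List.flatMap_cons, hl, Option.getD_some]
      rw [List.drop_eq_getElem_cons hlt, List.cons_append]
    rw [step]
    conv_rhs => rw [recurrLoop]
    split
    · next heq => simp [hg] at heq
    · rw [ih hDom (fun f hfm => by
        rcases List.mem_cons.mp hfm with h1 | h2
        · subst h1; exact hf (node, i) (by simp)
        · exact hf f (List.mem_cons_of_mem _ h2))]
      congr 1
      simp only [pvFlat, List.flatMap_cons, hl, Option.getD_some]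
    · next heq => simp [hg] at heq
  | case5 path mask node i rest nbrs hl hlt hg hs =>
    intro hDom hf
    exfalso
    obtain ⟨hR, hF⟩ := hf (node, i) (by simp)
    have hnbR : nbrs[i] ∈ R := hclosed node hR hF nbrs hl nbrs[i] (List.getElem_mem hlt)
    rw [PySem.List.pySet?_eq_none_iff] at hs
    rw [hDom.1] at hs
    exact hs (hgood nbrs[i] hnbR).1
  | case6 path mask node i rest nbrs hl hlt hg mask' hs ih =>
    intro hDom hf
    obtain ⟨hR, hF⟩ := hf (node, i) (by simp)
    have hnbR : nbrs[i] ∈ R := hclosed node hR hF nbrs hl nbrs[i] (List.getElem_mem hlt)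
    have hnbF : PySem.List.pyGet? mask0 nbrs[i] = some false := pvFalse_orig hDom hg
    obtain ⟨c, hc⟩ := Option.isSome_iff_exists.mp
      (pvLookup_isSome_of_mem ((hgood nbrs[i] hnbR).2 hnbF))
    have hDom' : pvMaskMono mask0 mask' := pvMaskMono_set hDom hs
    have hf' : ∀ f ∈ (nbrs[i], 0) :: (node, i + 1) :: rest,
        f.1 ∈ R ∧ PySem.List.pyGet? mask0 f.1 = some false := by
      intro f hfm
      rcases List.mem_cons.mp hfm with h1 | h2
      · subst h1; exact ⟨hnbR, hnbF⟩
      · rcases List.mem_cons.mp h2 with h3 | h4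
        · subst h3; exact hf (node, i) (by simp)
        · exact hf f (List.mem_cons_of_mem _ h4)
    have step : pvFlat adj ((node, i) :: rest) =
        nbrs[i] :: (nbrs.drop (i + 1) ++ pvFlat adj rest) := by
      simp only [pvFlat, List.flatMap_cons, hl, Option.getD_some]
      rw [List.drop_eq_getElem_cons hlt, List.cons_append]
    rw [step]
    conv_rhs => rw [recurrLoop]
    split
    · next heq => simp [hg] at heq
    · next heq => simp [hg] at heq
    · split
      · next heq => simp [hs] at heq
      · next mask'' heq =>
        rw [hs] at heq
        injection heq with heq'
        subst heq'
        simp only [hc]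
        rw [ih hDom' hf']
        congr 1
        simp only [pvFlat, List.flatMap_cons, hl, hc, Option.getD_some, List.drop_zero]
  | case7 path mask node i rest nbrs hl hlt ih =>
    intro hDom hf
    have step : pvFlat adj ((node, i) :: rest) = pvFlat adj rest := by
      simp only [pvFlat, List.flatMap_cons, hl, Option.getD_some]
      rw [List.drop_eq_nil_of_le (Nat.le_of_not_lt hlt), List.nil_append]
    rw [step]
    exact ih hDom (fun f hfm => hf f (List.mem_cons_of_mem _ hfm))

-- ===== VERDICT (by name: the statement is the Claim_ definition above) =====
theorem recurr_spec : Claim_equal_recurr := by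
  intro adj start mask _ hpre
  unfold Spec_recurr recurr recurr_alt
  have hstart : start ∈ pvReach adj mask start :=
    pvIter_sub adj mask (pvUniv adj start) ((pvUniv adj start).dedup.length + 1) [start]
      (fun x hx => by rw [List.mem_singleton.mp hx]; exact List.mem_cons_self)
      (List.mem_singleton.mpr rfl)
  have hclosed : ∀ n ∈ pvReach adj mask start, PySem.List.pyGet? mask n = some false →
      ∀ vs, pvLookup adj n = some vs → ∀ v ∈ vs, v ∈ pvReach adj mask start := by
    intro n hn hF vs hvs v hv
    obtain ⟨p, hp, hp2⟩ := pvLookup_eq_some_mem hvs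
    have hvu : v ∈ pvUniv adj start :=
      List.mem_cons_of_mem _ (List.mem_flatMap.mpr ⟨p, hp, hp2 ▸ hv⟩)
    refine pvIter_closed adj mask (pvUniv adj start) ((pvUniv adj start).dedup.length + 1)
      [start] (List.nodup_singleton _)
      (fun x hx => by rw [List.mem_singleton.mp hx]; exact List.mem_cons_self)
      (by omega) n hn v ?_ hvu
    unfold pvNbrs
    rw [if_pos hF, hvs]
    exact hv
  cases hg : PySem.List.pyGet? mask start with
  | none =>
    rw [PySem.List.pyGet?_eq_none_iff] at hg
    exact absurd (hpre start hstart).1 hg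
  | some b =>
    cases b with
    | true =>
      rw [recurrLoop]
      split
      · next heq => simp [hg] at heq
      · rw [recurrLoop]
      · next heq => simp [hg] at heq
    | false =>
      cases hs : PySem.List.pySet? mask start true with
      | none =>
        rw [PySem.List.pySet?_eq_none_iff] at hs
        exact absurd (hpre start hstart).1 hs
      | some mask' =>
        obtain ⟨c, hc⟩ := Option.isSome_iff_exists.mp
          (pvLookup_isSome_of_mem ((hpre start hstart).2 hg))
        rw [recurrLoop]
        split
        · next heq => simp [hg] at heq
        · next heq => simp [hg] at heq
        · split
          · next heq => simp [hs] at heq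
          · next mask'' heq =>
            rw [hs] at heq
            injection heq with heq'
            subst heq'
            simp only [hc]
            rw [pvMain adj mask (pvReach adj mask start) hpre hclosed [(start, 0)] [start]
                  mask' (pvMaskMono_set (pvMaskMono_refl mask) hs)
                  (by intro f hfm; rw [List.mem_singleton.mp hfm]; exact ⟨hstart, hg⟩)]
            congr 1
            simp [pvFlat, hc]
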